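-- pv_equiv track=rewrite | github.com/aod321/diffusion_policy_realman | mcap_pose_loader.py | choose_pose_topic
-- ===== SOURCE A (Python) =====
-- from typing import Dict, Iterator, Optional, Tuple
--
-- def choose_pose_topic(topic_counts: Dict[str, int]) -> str:
--     """Choose a topic by highest message count, require tie-break when equal."""
--     if not topic_counts:
--         raise ValueError("No pose topic candidates found in MCAP")
--     max_count = max(topic_counts.values())
--     winners = sorted(topic for topic, count in topic_counts.items() if count == max_count)
--     if len(winners) > 1:
--         joined = ", ".join(winners)
--         raise ValueError(
--             f"Multiple pose topics have the same max count ({max_count}): {joined}. "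
--             "Please specify --pose-topic explicitly."
--         )
--     return winners[0]
-- ===== SOURCE B (Python) =====
-- def choose_pose_topic(topic_counts):
--     """Choose a topic by highest message count, require tie-break when equal."""
--     if not topic_counts:
--         raise ValueError("No pose topic candidates found in MCAP")
--     it = iter(topic_counts.items())
--     first_topic, best_count = next(it)
--     winners = [first_topic]
--     for topic, count in it:
--         if count > best_count:
--             best_count = count
--             winners = [topic]
--         elif count == best_count:
--             winners.append(topic)
--     winners.sort()
--     if len(winners) > 1:
--         joined = ", ".join(winners)
--         raise ValueError(
--             f"Multiple pose topics have the same max count ({best_count}): {joined}. "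
--             "Please specify --pose-topic explicitly."
--         )
--     return winners[0]
-- ===== Notes on version B (the rewrite author's own statement) =====
-- stated objective: simpler
-- what changed: Replaces the max-over-values pass plus a separate filter-comprehension pass with one accumulator loop over items() that resets a winners list on a strictly higher count and appends on a tie.
import Mathlib
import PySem

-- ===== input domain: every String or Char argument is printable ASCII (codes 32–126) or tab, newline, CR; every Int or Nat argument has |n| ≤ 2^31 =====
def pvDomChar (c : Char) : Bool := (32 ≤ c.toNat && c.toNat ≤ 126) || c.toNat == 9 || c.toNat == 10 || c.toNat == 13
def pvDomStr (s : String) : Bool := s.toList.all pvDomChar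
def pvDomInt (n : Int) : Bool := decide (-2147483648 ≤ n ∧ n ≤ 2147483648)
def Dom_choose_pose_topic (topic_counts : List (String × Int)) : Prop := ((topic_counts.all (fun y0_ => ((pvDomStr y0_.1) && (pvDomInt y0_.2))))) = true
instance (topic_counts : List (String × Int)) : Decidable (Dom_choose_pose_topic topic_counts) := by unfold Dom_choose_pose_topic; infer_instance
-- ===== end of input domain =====

-- B replaces A's max-over-values pass plus separate filter comprehension by one accumulator
-- loop over the items that resets a winners list on a strictly higher count (objective: simpler).
-- Both Pythons raise ValueError on an empty dict and on a tie for the maximum; Pre_ excludes those.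

-- ===== PORT A =====
-- max(topic_counts.values()); winners = sorted(topic for …, if count == max_count);
-- the raising branches (empty input, len(winners) > 1) return "" and are excluded by Pre_.
def choose_pose_topic (topic_counts : List (String × Int)) : String :=
  match PySem.List.max? (topic_counts.map Prod.snd) (fun v => v) with
  | none => ""   -- empty dict: Python raises ValueError
  | some max_count =>
    let winners := PySem.List.sorted
      ((topic_counts.filter (fun p => p.2 = max_count)).map Prod.fst) (fun t => t) false
    if winners.length > 1 then ""   -- tie: Python raises ValueError
    else winners.headD ""

-- ===== PORT B =====
-- the accumulator loop of Source B: (best_count, winners) over the remaining items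
def cptAltLoop : List (String × Int) → Int → List String → (Int × List String)
  | [], best, ws => (best, ws)
  | (t, c) :: rest, best, ws =>
    if c > best then cptAltLoop rest c [t]
    else if c = best then cptAltLoop rest best (ws ++ [t])
    else cptAltLoop rest best ws

def choose_pose_topic_alt (topic_counts : List (String × Int)) : String :=
  match topic_counts with
  | [] => ""   -- empty dict: Python raises ValueError
  | (t, c) :: rest =>
    let (best, ws) := cptAltLoop rest c [t]
    let winners := PySem.List.sorted ws (fun x => x) false
    if winners.length > 1 then ""   -- tie: Python raises ValueError (best is the max count)
    else winners.headD ""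

-- ===== PRECONDITION & SPEC =====
-- Pre_: the dict is nonempty and exactly one entry attains the maximal count — exactly the
-- inputs on which Python A returns instead of raising ValueError.
def Pre_choose_pose_topic (topic_counts : List (String × Int)) : Prop :=
  topic_counts ≠ [] ∧
  (topic_counts.filter (fun p => decide (∀ q ∈ topic_counts, q.2 ≤ p.2))).length = 1
instance (topic_counts : List (String × Int)) : Decidable (Pre_choose_pose_topic topic_counts) := by
  unfold Pre_choose_pose_topic; infer_instance

def pvWitness_choose_pose_topic : (List (String × Int)) := [("/pose", 3), ("/tf", 1)]

def Spec_choose_pose_topic (topic_counts : List (String × Int)) (out : String) : Prop := out = choose_pose_topic_alt topic_counts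
instance (topic_counts : List (String × Int)) (out : String) : Decidable (Spec_choose_pose_topic topic_counts out) := by unfold Spec_choose_pose_topic; infer_instance

-- ===== CLAIM (what is proved, stated in full; the proofs are below) =====
def Claim_equal_choose_pose_topic : Prop := ∀ (topic_counts : List (String × Int)), Dom_choose_pose_topic topic_counts → Pre_choose_pose_topic topic_counts → Spec_choose_pose_topic topic_counts (choose_pose_topic topic_counts)

-- ===== LEMMAS AND PROOFS =====

-- the loop of B computes the running max and the sorted-later list of first-components of
-- the entries attaining it (discarding the carried ws when a strictly larger count appears)
theorem cptAltLoop_spec (xs : List (String × Int)) :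
    ∀ (b : Int) (ws : List String),
      cptAltLoop xs b ws =
        (xs.foldl (fun a p => max a p.2) b,
         (if b = xs.foldl (fun a p => max a p.2) b then ws else []) ++
           (xs.filter (fun p => p.2 = xs.foldl (fun a p => max a p.2) b)).map Prod.fst) := by
  induction xs with
  | nil => intro b ws; simp [cptAltLoop]
  | cons hd tl ih =>
    intro b ws
    obtain ⟨t, c⟩ := hd
    have hble : ∀ (a : Int), a ≤ tl.foldl (fun a p => max a p.2) a := by
      intro a
      have := (PySem.List.le_foldl_max_int tl Prod.snd a).1
      simpa using this
    by_cases h1 : c > b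
    · have hM : tl.foldl (fun a p => max a p.2) (max b c) = tl.foldl (fun a p => max a p.2) c := by
        rw [max_eq_right (le_of_lt h1)]
      have hbne : ¬ (b = tl.foldl (fun a p => max a p.2) c) := by
        have := hble c; intro he; omega
      have hcle : c ≤ tl.foldl (fun a p => max a p.2) c := hble c
      simp only [cptAltLoop, if_pos h1, ih c [t], List.foldl_cons, hM, if_neg hbne]
      by_cases hc : c = tl.foldl (fun a p => max a p.2) c
      · simp [List.filter_cons, ← hc]
      · simp [List.filter_cons, hc]
    · have hmax : max b c = b := by omega
      by_cases h2 : c = b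
      · subst h2
        simp only [cptAltLoop, if_neg h1, if_pos rfl, ih c (ws ++ [t]), List.foldl_cons, hmax]
        by_cases hc : c = tl.foldl (fun a p => max a p.2) c
        · simp [List.filter_cons, ← hc]
        · simp [List.filter_cons, hc]
      · have hcne : ¬ (c = tl.foldl (fun a p => max a p.2) b) := by
          have := hble b; intro he; omega
        simp [cptAltLoop, if_neg h1, if_neg h2, ih b ws, hmax, List.filter_cons, hcne]

-- the two ports agree on EVERY input (the raising branches line up too)
theorem choose_pose_topic_eq (topic_counts : List (String × Int)) :
    choose_pose_topic topic_counts = choose_pose_topic_alt topic_counts := by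
  cases topic_counts with
  | nil => simp [choose_pose_topic, choose_pose_topic_alt, PySem.List.max?]
  | cons hd tl =>
    obtain ⟨t, c⟩ := hd
    have hmax : PySem.List.max? (((t, c) :: tl).map Prod.snd) (fun v => v) =
        some ((tl.map Prod.snd).foldl max c) := by
      simpa using PySem.List.max?_id_cons c (tl.map Prod.snd)
    have hfold : (tl.map Prod.snd).foldl max c = tl.foldl (fun a p => max a p.2) c := by
      rw [List.foldl_map]
    rw [choose_pose_topic, hmax, choose_pose_topic_alt]
    rw [cptAltLoop_spec tl c [t]]
    simp only [hfold]
    by_cases hc : c = tl.foldl (fun a p => max a p.2) c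
    · rw [show tl.foldl (fun a p => max a p.2) c = c from hc.symm]
      rw [List.filter_cons, if_pos (by simp : decide ((t, c).2 = c) = true),
        if_pos (rfl : c = c), List.map_cons, List.singleton_append]
    · simp [List.filter_cons, hc]

-- ===== VERDICT (by name: the statement is the Claim_ definition above) =====
theorem choose_pose_topic_spec : Claim_equal_choose_pose_topic := by
  intro tc _ _
  unfold Spec_choose_pose_topic
  exact choose_pose_topic_eq tc
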